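-- pv_equiv track=rewrite | github.com/LSJL2002/-3 | cipher_decipher.py | cipher_with_ascii
-- ===== SOURCE A (Python) =====
-- def cipher_with_ascii(text, shift):
--     result = []
--     for i,char in enumerate(text):
--         if i%5 == 0 and i != 0:
--             result.append(" ")
--         if char.islower():
--             new_char = chr((ord(char)-97-shift)%26+97)
--         else:
--             new_char = chr((ord(char)-65-shift)%26+65)
--         result.append(new_char)
--     return ''.join(result)
-- ===== SOURCE B (Python) =====
-- def cipher_with_ascii(text, shift):
--     shifted = [chr((ord(c) - 97 - shift) % 26 + 97) if c.islower()
--                else chr((ord(c) - 65 - shift) % 26 + 65)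
--                for c in text]
--     return ' '.join(''.join(shifted[i:i + 5]) for i in range(0, len(shifted), 5))
-- ===== Notes on version B (the rewrite author's own statement) =====
-- stated objective: idiomatic
-- what changed: Instead of interleaving space insertion with the per-character shift via an index-modulo test inside one loop, B first maps the whole string through the shift transform and then slices the result into 5-character chunks joined by spaces.
import Mathlib
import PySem

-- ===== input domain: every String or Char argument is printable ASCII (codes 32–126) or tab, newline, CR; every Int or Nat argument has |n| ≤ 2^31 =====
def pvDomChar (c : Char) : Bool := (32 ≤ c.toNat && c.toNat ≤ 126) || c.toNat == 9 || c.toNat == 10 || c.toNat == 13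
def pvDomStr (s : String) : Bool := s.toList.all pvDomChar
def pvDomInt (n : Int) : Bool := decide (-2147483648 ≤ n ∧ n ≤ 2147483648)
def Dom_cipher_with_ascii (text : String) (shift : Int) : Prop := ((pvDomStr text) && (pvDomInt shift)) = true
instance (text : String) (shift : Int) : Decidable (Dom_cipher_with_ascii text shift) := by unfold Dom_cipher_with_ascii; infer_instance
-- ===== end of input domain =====

-- B re-implements A as map-then-chunk: shift every character first, then join 5-character chunks with spaces (idiomatic decomposition, same cost).

-- shared per-character shift: both Pythons contain this identical arithmetic
def pvShiftChar (shift : Int) (c : Char) : Char :=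
  if PySem.Chars.islower c then
    Char.ofNat ((PySem.Int.mod ((c.toNat : Int) - 97 - shift) 26).toNat + 97)
  else
    Char.ofNat ((PySem.Int.mod ((c.toNat : Int) - 65 - shift) 26).toNat + 65)

-- ===== PORT A =====
def cipher_with_ascii (text : String) (shift : Int) : String :=
  String.ofList
    ((PySem.List.enumerate text.toList 0).foldl
      (fun acc p =>
        (if PySem.Int.mod p.1 5 == 0 && p.1 != 0 then acc ++ [' '] else acc) ++ [pvShiftChar shift p.2])
      [])

-- ===== PORT B =====
def cipher_with_ascii_alt (text : String) (shift : Int) : String :=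
  let shifted := text.toList.map (pvShiftChar shift)
  PySem.Str.join " "
    ((PySem.List.pyRange 0 (shifted.length : Int) 5).map
      (fun i => String.ofList (PySem.List.slice shifted (some i) (some (i + 5)))))

-- ===== PRECONDITION & SPEC =====
def Spec_cipher_with_ascii (text : String) (shift : Int) (out : String) : Prop := out = cipher_with_ascii_alt text shift
instance (text : String) (shift : Int) (out : String) : Decidable (Spec_cipher_with_ascii text shift out) := by unfold Spec_cipher_with_ascii; infer_instance

-- ===== CLAIM (what is proved, stated in full; the proofs are below) =====
def Claim_equal_cipher_with_ascii : Prop := ∀ (text : String) (shift : Int), Dom_cipher_with_ascii text shift → Spec_cipher_with_ascii text shift (cipher_with_ascii text shift)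

-- ===== LEMMAS AND PROOFS =====

-- the per-index piece A appends: maybe a space, then the (already shifted) character
def pvPiece (p : Int × Char) : List Char :=
  (if PySem.Int.mod p.1 5 == 0 && p.1 != 0 then [' '] else []) ++ [p.2]

-- reference shape: chunks of 5 joined by single spaces
def pvChunksJoin : List Char → List Char
  | [] => []
  | a :: l =>
      (a :: l).take 5 ++
        (if (a :: l).drop 5 = [] then [] else ' ' :: pvChunksJoin ((a :: l).drop 5))
termination_by l => l.length
decreasing_by simp

theorem pvPiece_space (i : Int) (c : Char) (h0 : 0 < i) (h5 : i % 5 = 0) :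
    pvPiece (i, c) = [' ', c] := by
  have hb : (PySem.Int.mod i 5 == 0 && i != 0) = true := by
    rw [PySem.Int.mod_eq_emod_of_pos (by norm_num)]
    simp only [Bool.and_eq_true, beq_iff_eq, bne_iff_ne, ne_eq]
    exact ⟨h5, by omega⟩
  simp only [pvPiece, hb]
  rfl

theorem pvPiece_nospace (i : Int) (c : Char) (h : ¬(i % 5 = 0 ∧ i ≠ 0)) :
    pvPiece (i, c) = [c] := by
  have hb : ¬((PySem.Int.mod i 5 == 0 && i != 0) = true) := by
    rw [PySem.Int.mod_eq_emod_of_pos (by norm_num)]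
    simp only [Bool.and_eq_true, beq_iff_eq, bne_iff_ne, ne_eq]
    tauto
  simp only [pvPiece, if_neg hb]
  rfl

theorem pvFold_eq_flatMap (L : List (Int × Char)) (acc : List Char) :
    L.foldl (fun acc p =>
      (if PySem.Int.mod p.1 5 == 0 && p.1 != 0 then acc ++ [' '] else acc) ++ [p.2]) acc
      = acc ++ L.flatMap pvPiece := by
  have hstep : (fun (acc : List Char) (p : Int × Char) =>
      (if PySem.Int.mod p.1 5 == 0 && p.1 != 0 then acc ++ [' '] else acc) ++ [p.2])
      = fun acc p => acc ++ pvPiece p := by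
    funext acc p
    cases hcond : (PySem.Int.mod p.1 5 == 0 && p.1 != 0) <;>
      simp only [pvPiece, hcond, if_true, if_false, Bool.false_eq_true, List.nil_append,
        List.append_assoc, List.singleton_append]
  rw [hstep, PySem.List.foldl_append_eq_flatMap]

theorem pvFold_map (f : Char → Char) (l : List Char) (s : Int) (acc : List Char) :
    (PySem.List.enumerate l s).foldl (fun acc p =>
      (if PySem.Int.mod p.1 5 == 0 && p.1 != 0 then acc ++ [' '] else acc) ++ [f p.2]) acc
    = (PySem.List.enumerate (l.map f) s).foldl (fun acc p =>
      (if PySem.Int.mod p.1 5 == 0 && p.1 != 0 then acc ++ [' '] else acc) ++ [p.2]) acc := by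
  induction l generalizing s acc with
  | nil => simp [PySem.List.enumerate]
  | cons x xs ih =>
      simp only [List.map_cons, PySem.List.enumerate_cons, List.foldl_cons]
      exact ih (s + 1) _

-- A side: the flatMap over indexed pieces is the chunked join, for starts that are positive multiples of 5
theorem pvAux1 (n : Nat) : ∀ (l : List Char) (s : Int), l.length ≤ n → 0 < s → s % 5 = 0 →
    (PySem.List.enumerate l s).flatMap pvPiece
      = (if l = [] then [] else ' ' :: pvChunksJoin l) := by
  induction n with
  | zero =>
      intro l s hl _ _
      have : l = [] := List.length_eq_zero_iff.mp (Nat.le_zero.mp hl)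
      subst this; simp [PySem.List.enumerate]
  | succ n ih =>
      intro l s hl hs0 hs5
      match l with
      | [] => simp [PySem.List.enumerate]
      | [a] =>
          simp only [PySem.List.enumerate_cons, PySem.List.enumerate_nil, List.flatMap_cons,
            List.flatMap_nil, pvPiece_space s a hs0 hs5, pvChunksJoin]
          simp
      | [a, b] =>
          simp only [PySem.List.enumerate_cons, PySem.List.enumerate_nil, List.flatMap_cons,
            List.flatMap_nil, pvPiece_space s a hs0 hs5,
            pvPiece_nospace (s+1) b (by omega), pvChunksJoin]
          simp
      | [a, b, c] =>
          simp only [PySem.List.enumerate_cons, PySem.List.enumerate_nil, List.flatMap_cons,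
            List.flatMap_nil, pvPiece_space s a hs0 hs5,
            pvPiece_nospace (s+1) b (by omega), pvPiece_nospace (s+1+1) c (by omega), pvChunksJoin]
          simp
      | [a, b, c, d] =>
          simp only [PySem.List.enumerate_cons, PySem.List.enumerate_nil, List.flatMap_cons,
            List.flatMap_nil, pvPiece_space s a hs0 hs5,
            pvPiece_nospace (s+1) b (by omega), pvPiece_nospace (s+1+1) c (by omega),
            pvPiece_nospace (s+1+1+1) d (by omega), pvChunksJoin]
          simp
      | [a, b, c, d, e] =>
          simp only [PySem.List.enumerate_cons, PySem.List.enumerate_nil, List.flatMap_cons,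
            List.flatMap_nil, pvPiece_space s a hs0 hs5,
            pvPiece_nospace (s+1) b (by omega), pvPiece_nospace (s+1+1) c (by omega),
            pvPiece_nospace (s+1+1+1) d (by omega), pvPiece_nospace (s+1+1+1+1) e (by omega),
            pvChunksJoin]
          simp
      | a :: b :: c :: d :: e :: x :: rest =>
          have hrest : (x :: rest).length ≤ n := by simp at hl ⊢; omega
          have htail := ih (x :: rest) (s + 1 + 1 + 1 + 1 + 1) hrest (by omega) (by omega)
          rw [PySem.List.enumerate_cons, PySem.List.enumerate_cons, PySem.List.enumerate_cons,
            PySem.List.enumerate_cons, PySem.List.enumerate_cons, List.flatMap_cons,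
            List.flatMap_cons, List.flatMap_cons, List.flatMap_cons, List.flatMap_cons, htail,
            pvPiece_space s a hs0 hs5,
            pvPiece_nospace (s + 1) b (by omega), pvPiece_nospace (s + 1 + 1) c (by omega),
            pvPiece_nospace (s + 1 + 1 + 1) d (by omega),
            pvPiece_nospace (s + 1 + 1 + 1 + 1) e (by omega)]
          rw [if_neg (by simp)]
          conv_rhs => rw [pvChunksJoin]
          simp

theorem pvAside (l : List Char) :
    (PySem.List.enumerate l 0).flatMap pvPiece = pvChunksJoin l := by
  match l with
  | [] => simp [PySem.List.enumerate, pvChunksJoin]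
  | [a] =>
      simp only [PySem.List.enumerate_cons, PySem.List.enumerate_nil, List.flatMap_cons,
        List.flatMap_nil, pvPiece_nospace 0 a (by omega), pvChunksJoin]
      simp
  | [a, b] =>
      simp only [PySem.List.enumerate_cons, PySem.List.enumerate_nil, List.flatMap_cons,
        List.flatMap_nil, pvPiece_nospace 0 a (by omega),
        pvPiece_nospace (0+1) b (by omega), pvChunksJoin]
      simp
  | [a, b, c] =>
      simp only [PySem.List.enumerate_cons, PySem.List.enumerate_nil, List.flatMap_cons,
        List.flatMap_nil, pvPiece_nospace 0 a (by omega),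
        pvPiece_nospace (0+1) b (by omega), pvPiece_nospace (0+1+1) c (by omega), pvChunksJoin]
      simp
  | [a, b, c, d] =>
      simp only [PySem.List.enumerate_cons, PySem.List.enumerate_nil, List.flatMap_cons,
        List.flatMap_nil, pvPiece_nospace 0 a (by omega),
        pvPiece_nospace (0+1) b (by omega), pvPiece_nospace (0+1+1) c (by omega),
        pvPiece_nospace (0+1+1+1) d (by omega), pvChunksJoin]
      simp
  | [a, b, c, d, e] =>
      simp only [PySem.List.enumerate_cons, PySem.List.enumerate_nil, List.flatMap_cons,
        List.flatMap_nil, pvPiece_nospace 0 a (by omega),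
        pvPiece_nospace (0+1) b (by omega), pvPiece_nospace (0+1+1) c (by omega),
        pvPiece_nospace (0+1+1+1) d (by omega), pvPiece_nospace (0+1+1+1+1) e (by omega),
        pvChunksJoin]
      simp
  | a :: b :: c :: d :: e :: x :: rest =>
      have htail := pvAux1 (x :: rest).length (x :: rest) (0 + 1 + 1 + 1 + 1 + 1) le_rfl (by omega) (by omega)
      rw [PySem.List.enumerate_cons, PySem.List.enumerate_cons, PySem.List.enumerate_cons,
        PySem.List.enumerate_cons, PySem.List.enumerate_cons, List.flatMap_cons,
        List.flatMap_cons, List.flatMap_cons, List.flatMap_cons, List.flatMap_cons, htail,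
        pvPiece_nospace 0 a (by omega),
        pvPiece_nospace (0 + 1) b (by omega), pvPiece_nospace (0 + 1 + 1) c (by omega),
        pvPiece_nospace (0 + 1 + 1 + 1) d (by omega),
        pvPiece_nospace (0 + 1 + 1 + 1 + 1) e (by omega)]
      rw [if_neg (by simp)]
      conv_rhs => rw [pvChunksJoin]
      simp

-- B side helpers: pyRange with step 5
theorem pvRange5_cons (a b : Int) (h : a < b) :
    PySem.List.pyRange a b 5 = a :: PySem.List.pyRange (a + 5) b 5 := by
  rw [PySem.List.pyRange_of_pos a b (by norm_num), PySem.List.pyRange_of_pos (a+5) b (by norm_num)]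
  have hcnt : ((b - a + 5 - 1) / 5).toNat =
      (if a + 5 < b then ((b - (a + 5) + 5 - 1) / 5).toNat else 0) + 1 := by
    split <;> omega
  rw [if_pos h, hcnt, List.range_succ_eq_map]
  simp only [List.map_cons, List.map_map]
  congr 1
  · simp
  · apply List.map_congr_left
    intro k _
    simp only [Function.comp]
    push_cast
    ring

theorem pvRange5_shift (b : Int) :
    PySem.List.pyRange 5 b 5 = (PySem.List.pyRange 0 (b - 5) 5).map (fun x => x + 5) := by
  rw [PySem.List.pyRange_of_pos 5 b (by norm_num), PySem.List.pyRange_of_pos 0 (b-5) (by norm_num)]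
  have : (if 5 < b then ((b - 5 + 5 - 1) / 5).toNat else 0)
       = (if 0 < b - 5 then ((b - 5 - 0 + 5 - 1) / 5).toNat else 0) := by split_ifs <;> omega
  rw [this]
  rw [List.map_map]
  apply List.map_congr_left
  intro k _
  simp only [Function.comp]
  ring

theorem pvSlice_drop (l : List Char) (i : Int) (hi : 0 ≤ i) :
    PySem.List.slice l (some (i + 5)) (some (i + 5 + 5))
      = PySem.List.slice (l.drop 5) (some i) (some (i + 5)) := by
  obtain ⟨j, rfl⟩ := Int.eq_ofNat_of_zero_le hi
  have h1 : (j : Int) + 5 = ((j + 5 : Nat) : Int) := by push_cast; ring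
  have h2 : ((j + 5 : Nat) : Int) + 5 = ((j + 10 : Nat) : Int) := by push_cast; ring
  rw [h1, h2, PySem.List.slice_natCast, PySem.List.slice_natCast, List.drop_drop]
  congr 1
  · omega
  · rw [Nat.add_comm j 5]

theorem pvJoin_cons (sep p : List Char) (rest : List (List Char)) (h : rest ≠ []) :
    PySem.Chars.join sep (p :: rest) = p ++ sep ++ PySem.Chars.join sep rest := by
  rcases List.exists_cons_of_ne_nil h with ⟨q, qs, rfl⟩
  exact PySem.Chars.join_cons_cons sep p q qs

-- B side: the join of 5-slices is the chunked join
theorem pvAux2 (n : Nat) : ∀ (l : List Char), l.length ≤ n →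
    PySem.Chars.join [' ']
      ((PySem.List.pyRange 0 (l.length : Int) 5).map
        (fun i => PySem.List.slice l (some i) (some (i + 5))))
      = pvChunksJoin l := by
  induction n with
  | zero =>
      intro l hl
      have : l = [] := List.length_eq_zero_iff.mp (Nat.le_zero.mp hl)
      subst this
      simp only [List.length_nil, Nat.cast_zero]
      rw [PySem.List.pyRange_of_pos 0 0 (by norm_num)]
      simp [PySem.Chars.join, List.intercalate, pvChunksJoin]
  | succ n ih =>
      intro l hl
      match l with
      | [] =>
          simp only [List.length_nil, Nat.cast_zero]
          rw [PySem.List.pyRange_of_pos 0 0 (by norm_num)]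
          simp [PySem.Chars.join, List.intercalate, pvChunksJoin]
      | a :: l' =>
          have hm : (0 : Int) < ((a :: l').length : Int) := by simp
          rw [pvRange5_cons 0 _ hm, zero_add, pvRange5_shift]
          have hlen : ((a :: l').length : Int) - 5 = (((a :: l').drop 5).length : Int) ∨
              (((a :: l').length : Int) - 5 ≤ 0 ∧ ((((a :: l').drop 5).length : Int)) = 0) := by
            simp; omega
          have hrange : PySem.List.pyRange 0 (((a :: l').length : Int) - 5) 5
              = PySem.List.pyRange 0 ((((a :: l').drop 5).length : Int)) 5 := by
            rcases hlen with h | ⟨h1, h2⟩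
            · rw [h]
            · rw [h2, PySem.List.pyRange_of_pos 0 _ (by norm_num),
                PySem.List.pyRange_of_pos 0 0 (by norm_num)]
              rw [if_neg (by omega), if_neg (by omega)]
          rw [hrange]
          have hslice0 : PySem.List.slice (a :: l') (some 0) (some (0 + 5))
              = (a :: l').take 5 := by
            have : (0 : Int) + 5 = ((0 : Nat) : Int) + ((5 : Nat) : Int) := by norm_num
            rw [this]
            have h0 : (0 : Int) = ((0 : Nat) : Int) := by norm_num
            rw [h0, PySem.List.slice_natCast_add]
            simp
          have hmapshift :
              ((PySem.List.pyRange 0 ((((a :: l').drop 5).length : Int)) 5).map (fun x => x + 5)).map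
                  (fun i => PySem.List.slice (a :: l') (some i) (some (i + 5)))
              = (PySem.List.pyRange 0 ((((a :: l').drop 5).length : Int)) 5).map
                  (fun i => PySem.List.slice ((a :: l').drop 5) (some i) (some (i + 5))) := by
            rw [List.map_map]
            apply List.map_congr_left
            intro i himem
            have hpos : 0 ≤ i := by
              have := (PySem.List.mem_pyRange_iff_of_pos (by norm_num : (0:Int) < 5) i).mp himem
              omega
            simp only [Function.comp]
            exact pvSlice_drop (a :: l') i hpos
          rw [List.map_cons, hslice0, hmapshift]
          have htail : ((a :: l').drop 5).length ≤ n := by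
            simp only [List.length_cons, List.length_drop] at hl ⊢
            omega
          by_cases hnil : (a :: l').drop 5 = []
          · rw [hnil]
            rw [PySem.List.pyRange_of_pos 0 _ (by norm_num)]
            simp only [List.length_nil, Nat.cast_zero, if_neg (lt_irrefl (0:Int)),
              List.range_zero, List.map_nil]
            rw [PySem.Chars.join_singleton]
            conv_rhs => rw [pvChunksJoin]
            rw [hnil]
            simp
          · have hne : (PySem.List.pyRange 0 ((((a :: l').drop 5).length : Int)) 5) ≠ [] := by
              have : (0:Int) < (((a :: l').drop 5).length : Int) := by
                rcases List.exists_cons_of_ne_nil hnil with ⟨y, ys, hy⟩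
                rw [hy]; simp
              rw [pvRange5_cons 0 _ this]
              simp
            rw [pvJoin_cons [' '] _ _ (by simpa using hne)]
            rw [ih ((a :: l').drop 5) htail]
            conv_rhs => rw [pvChunksJoin]
            rw [if_neg hnil]
            simp
-- ===== VERDICT (by name: the statement is the Claim_ definition above) =====
theorem cipher_with_ascii_spec : Claim_equal_cipher_with_ascii := by
  intro text shift _
  unfold Spec_cipher_with_ascii cipher_with_ascii cipher_with_ascii_alt
  rw [pvFold_map, pvFold_eq_flatMap, List.nil_append, pvAside]
  have hB : (PySem.Str.join " "
      ((PySem.List.pyRange 0 ((text.toList.map (pvShiftChar shift)).length : Int) 5).map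
        (fun i => String.ofList (PySem.List.slice (text.toList.map (pvShiftChar shift))
          (some i) (some (i + 5)))))).toList
      = pvChunksJoin (text.toList.map (pvShiftChar shift)) := by
    rw [PySem.Str.toList_join, List.map_map]
    have hsep : " ".toList = [' '] := by decide
    rw [hsep]
    have hmap : (List.map (String.toList ∘ fun i =>
        String.ofList (PySem.List.slice (text.toList.map (pvShiftChar shift)) (some i) (some (i + 5))))
        (PySem.List.pyRange 0 ((text.toList.map (pvShiftChar shift)).length : Int) 5))
        = (PySem.List.pyRange 0 ((text.toList.map (pvShiftChar shift)).length : Int) 5).map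
            (fun i => PySem.List.slice (text.toList.map (pvShiftChar shift)) (some i) (some (i + 5))) := by
      apply List.map_congr_left
      intro i _
      simp [Function.comp, String.toList_ofList]
    rw [hmap]
    exact pvAux2 (text.toList.map (pvShiftChar shift)).length _ le_rfl
  calc String.ofList (pvChunksJoin (text.toList.map (pvShiftChar shift)))
      = String.ofList ((PySem.Str.join " "
          ((PySem.List.pyRange 0 ((text.toList.map (pvShiftChar shift)).length : Int) 5).map
            (fun i => String.ofList (PySem.List.slice (text.toList.map (pvShiftChar shift))
              (some i) (some (i + 5)))))).toList) := by rw [hB]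
    _ = _ := String.ofList_toList
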